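-- pv_equiv track=rewrite | github.com/IorenzoLF/Le_Refuge | Le_refuge/arc_agi_refuge/solveurs_versions/v2/solveur_arc_corrige_v2.py | _expandre_grille
-- ===== SOURCE A (Python) =====
-- from typing import Dict, List, Any, Optional, Tuple, Set
--
-- def _expandre_grille(grille: List[List[int]], h_out: int, w_out: int) -> List[List[int]]:
--     """Expandre une grille"""
--     if not grille:
--         return [[0]]
--
--     h_in, w_in = len(grille), len(grille[0])
--
--     resultat = []
--     for y in range(h_out):
--         ligne = []
--         for x in range(w_out):
--             y_in = y % h_in
--             x_in = x % w_in
--             ligne.append(grille[y_in][x_in])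
--         resultat.append(ligne)
--
--     return resultat
-- ===== SOURCE B (Python) =====
-- def _expandre_grille(grille, h_out, w_out):
--     """Tile grille to h_out x w_out by precomputing one full-width row per input row."""
--     if not grille:
--         return [[0]]
--     if h_out <= 0 or w_out <= 0:
--         return [[] for _ in range(h_out)]
--     h_in, w_in = len(grille), len(grille[0])
--     reps = w_out // w_in + 1
--     tiled = [(row[:w_in] * reps)[:w_out] for row in grille]
--     return [list(tiled[y % h_in]) for y in range(h_out)]
-- ===== Notes on version B (the rewrite author's own statement) =====
-- stated objective: idiomatic
-- what changed: B replaces A's per-cell nested loops with one precomputed full-width tiled row per input row (list repetition + slice) and a single vertical pass that copies the right precomputed row.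
import Mathlib
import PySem

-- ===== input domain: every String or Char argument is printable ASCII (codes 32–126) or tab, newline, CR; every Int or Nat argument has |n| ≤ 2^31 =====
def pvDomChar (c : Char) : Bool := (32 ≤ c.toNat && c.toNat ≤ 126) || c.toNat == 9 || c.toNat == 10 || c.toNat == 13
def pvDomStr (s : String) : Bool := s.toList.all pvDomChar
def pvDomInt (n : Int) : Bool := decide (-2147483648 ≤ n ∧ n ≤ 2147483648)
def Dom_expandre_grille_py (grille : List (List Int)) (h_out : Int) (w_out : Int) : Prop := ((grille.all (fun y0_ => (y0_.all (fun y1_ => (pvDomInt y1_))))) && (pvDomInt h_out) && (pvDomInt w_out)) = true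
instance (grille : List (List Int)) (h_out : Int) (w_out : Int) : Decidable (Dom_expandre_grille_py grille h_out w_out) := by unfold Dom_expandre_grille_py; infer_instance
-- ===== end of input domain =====

-- B builds each output row from one precomputed width-w_out tiled copy of its input row (list repetition + slice)
-- instead of A's per-cell modular indexing; return-value equivalence on inputs where A does not raise.

-- ===== PORT A =====
-- literal port of _expandre_grille; grille[0] is headD (exact: taken after the emptiness check);
-- grille[y_in][x_in] is pyGetD with default (out-of-range = Python IndexError, excluded by Pre_)
def expandre_grille_py (grille : List (List Int)) (h_out : Int) (w_out : Int) : List (List Int) :=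
  if grille = [] then [[0]]
  else
    let h_in : Int := grille.length
    let w_in : Int := (grille.headD []).length
    (PySem.List.pyRange 0 h_out).foldl (fun resultat y =>
      resultat ++ [(PySem.List.pyRange 0 w_out).foldl (fun ligne x =>
        ligne ++ [PySem.List.pyGetD (PySem.List.pyGetD grille (PySem.Int.mod y h_in) []) (PySem.Int.mod x w_in) 0]) []]) []

-- ===== PORT B =====
-- literal port of Source B; Python list repetition `row[:w_in] * reps` is flatten (replicate reps (row[:w_in]))
-- (exact here: reps ≥ 0); the final `list(...)` copy is the identity on values
def expandre_grille_py_alt (grille : List (List Int)) (h_out : Int) (w_out : Int) : List (List Int) :=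
  if grille = [] then [[0]]
  else if h_out ≤ 0 ∨ w_out ≤ 0 then (PySem.List.pyRange 0 h_out).map (fun _ => ([] : List Int))
  else
    let h_in : Int := grille.length
    let w_in : Int := (grille.headD []).length
    let reps : Int := PySem.Int.floordiv w_out w_in + 1
    let tiled : List (List Int) := grille.map (fun row =>
      PySem.List.slice ((List.replicate reps.toNat (PySem.List.slice row none (some w_in))).flatten) none (some w_out))
    (PySem.List.pyRange 0 h_out).map (fun y => PySem.List.pyGetD tiled (PySem.Int.mod y h_in) [])

-- ===== PRECONDITION & SPEC =====
-- Pre_ excludes exactly the inputs where the Python A raises: an empty first row with cells to fill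
-- (ZeroDivisionError) or a visited row shorter than the visited width min(w_out, w_in) (IndexError).
def Pre_expandre_grille_py (grille : List (List Int)) (h_out : Int) (w_out : Int) : Prop :=
  grille = [] ∨ h_out ≤ 0 ∨ w_out ≤ 0 ∨
    (0 < (grille.headD []).length ∧
      ∀ row ∈ grille.take h_out.toNat, min w_out ((grille.headD []).length : Int) ≤ (row.length : Int))
instance (grille : List (List Int)) (h_out : Int) (w_out : Int) : Decidable (Pre_expandre_grille_py grille h_out w_out) := by unfold Pre_expandre_grille_py; infer_instance
def pvWitness_expandre_grille_py : List (List Int) × Int × Int := ([[1, 2], [3, 4]], 3, 5)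

def Spec_expandre_grille_py (grille : List (List Int)) (h_out : Int) (w_out : Int) (out : List (List Int)) : Prop := out = expandre_grille_py_alt grille h_out w_out
instance (grille : List (List Int)) (h_out : Int) (w_out : Int) (out : List (List Int)) : Decidable (Spec_expandre_grille_py grille h_out w_out out) := by unfold Spec_expandre_grille_py; infer_instance

-- ===== CLAIM (what is proved, stated in full; the proofs are below) =====
def Claim_equal_expandre_grille_py : Prop := ∀ (grille : List (List Int)) (h_out : Int) (w_out : Int), Dom_expandre_grille_py grille h_out w_out → Pre_expandre_grille_py grille h_out w_out → Spec_expandre_grille_py grille h_out w_out (expandre_grille_py grille h_out w_out)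

-- ===== LEMMAS AND PROOFS =====

-- element of a k-fold repetition of r, read cyclically
theorem pv_flatten_replicate_getElem? {α : Type} (r : List α) :
    ∀ (k x : Nat), x < k * r.length →
      ((List.replicate k r).flatten)[x]? = r[x % r.length]? := by
  intro k
  induction k with
  | zero => intro x hx; omega
  | succ k ih =>
    intro x hx
    rw [List.replicate_succ, List.flatten_cons]
    by_cases hlt : x < r.length
    · rw [List.getElem?_append_left hlt, Nat.mod_eq_of_lt hlt]
    · push_neg at hlt
      rw [List.getElem?_append_right hlt,
        ih (x - r.length) (by have h := Nat.add_mul k 1 r.length; omega),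
        Nat.mod_eq_sub_mod hlt]

-- one row: A's per-cell modular reads equal B's repeated-and-sliced row (Nat form)
theorem pv_row_eq (row : List Int) (W win : Nat) (hwin : 0 < win)
    (hlen : min W win ≤ row.length) :
    (List.range W).map (fun x => row.getD (x % win) 0)
      = ((List.replicate (W / win + 1) (row.take win)).flatten).take W := by
  have hWb : W < (W / win + 1) * win := by
    have h1 := Nat.div_add_mod W win
    have h2 := Nat.mod_lt W hwin
    have h3 : (W / win + 1) * win = W / win * win + 1 * win := Nat.add_mul _ _ _
    have h4 : win * (W / win) = W / win * win := Nat.mul_comm _ _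
    omega
  apply List.ext_getElem?
  intro x
  by_cases hx : x < W
  · by_cases hr : win ≤ row.length
    · -- full-width row: row[:win] has length win and is read cyclically
      have hrl : (row.take win).length = win := by simp [List.length_take]; omega
      have hxm : x % win < win := Nat.mod_lt x hwin
      rw [List.getElem?_take_of_lt hx,
        pv_flatten_replicate_getElem? _ _ x (by rw [hrl]; exact hx.trans hWb), hrl,
        List.getElem?_take_of_lt hxm, List.getElem?_map, List.getElem?_range hx]
      simp [List.getD_eq_getElem?_getD, List.getElem?_eq_getElem (hxm.trans_le hr)]
    · -- narrow row (only with W ≤ win): only the first copy is read, at index x itself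
      push_neg at hr
      have hWle : W ≤ row.length := by
        rcases Nat.le_total W win with h | h
        · rw [Nat.min_eq_left h] at hlen; exact hlen
        · rw [Nat.min_eq_right h] at hlen; omega
      have hxr : x < row.length := hx.trans_le hWle
      have htk : List.take win row = row := List.take_of_length_le hr.le
      rw [List.getElem?_take_of_lt hx, htk,
        pv_flatten_replicate_getElem? _ _ x
          (hxr.trans_le (Nat.le_mul_of_pos_left row.length (Nat.succ_pos _))),
        Nat.mod_eq_of_lt hxr, List.getElem?_map, List.getElem?_range hx]
      simp [List.getD_eq_getElem?_getD, List.getElem?_eq_getElem hxr,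
        Nat.mod_eq_of_lt (show x < win by omega)]
  · push_neg at hx
    rw [List.getElem?_eq_none (by simpa using hx), List.getElem?_eq_none (by simp; omega)]

-- ===== VERDICT (by name: the statement is the Claim_ definition above) =====
theorem expandre_grille_py_spec : Claim_equal_expandre_grille_py := by
  intro grille h_out w_out _hdom hpre
  unfold Spec_expandre_grille_py expandre_grille_py expandre_grille_py_alt
  by_cases hg : grille = []
  · simp [hg]
  · simp only [if_neg hg]
    by_cases hneg : h_out ≤ 0 ∨ w_out ≤ 0
    · rw [if_pos hneg]
      rcases hneg with hh | hw
      · rw [PySem.List.pyRange_one_eq_nil hh]; rfl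
      · rw [PySem.List.pyRange_one_eq_nil hw]
        simp only [List.foldl_nil]
        rw [PySem.List.foldl_append_singleton_eq_map (fun _ : Int => ([] : List Int)),
          List.nil_append]
    · rw [if_neg hneg]
      push_neg at hneg
      obtain ⟨hh, hw⟩ := hneg
      -- Pre_ reduces to the interesting disjunct
      have hpre' : 0 < (grille.headD []).length ∧
          ∀ row ∈ grille.take h_out.toNat, min w_out ((grille.headD []).length : Int) ≤ (row.length : Int) := by
        rcases hpre with h | h | h | h
        · exact absurd h hg
        · omega
        · omega
        · exact h
      obtain ⟨hwin0, hrows⟩ := hpre'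
      set win : Nat := (grille.headD []).length with hwindef
      have hgl : 0 < grille.length := List.length_pos_iff.mpr hg
      -- rewrite A's outer loop as a map
      rw [PySem.List.foldl_append_singleton_eq_map
        (fun y => (PySem.List.pyRange 0 w_out).foldl (fun ligne x =>
          ligne ++ [PySem.List.pyGetD (PySem.List.pyGetD grille (PySem.Int.mod y (grille.length : Int)) [])
            (PySem.Int.mod x (win : Int)) 0]) [])]
      rw [List.nil_append]
      apply List.map_congr_left
      intro y hy
      obtain ⟨hy0, hyh⟩ := PySem.List.mem_pyRange_one.mp hy
      -- the visited input row
      have hm0 : 0 ≤ PySem.Int.mod y (grille.length : Int) := PySem.Int.mod_nonneg y (by exact_mod_cast hgl)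
      have hmlt : PySem.Int.mod y (grille.length : Int) < (grille.length : Int) := PySem.Int.mod_lt y (by exact_mod_cast hgl)
      have hmy : PySem.Int.mod y (grille.length : Int) ≤ y := by
        rw [PySem.Int.mod_eq_emod_of_pos (show (0:Int) < (grille.length : Int) by exact_mod_cast hgl)]
        have h3 := Int.ediv_nonneg hy0 (show (0:Int) ≤ (grille.length : Int) by positivity)
        have h4 := Int.emod_add_mul_ediv y (grille.length : Int)
        nlinarith
      have hilt : (PySem.Int.mod y (grille.length : Int)).toNat < grille.length := by omega
      have hih : (PySem.Int.mod y (grille.length : Int)).toNat < h_out.toNat := by omega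
      -- rewrite A's inner loop as a map, then both sides by row index
      rw [PySem.List.foldl_append_singleton_eq_map
        (fun x => PySem.List.pyGetD (PySem.List.pyGetD grille (PySem.Int.mod y (grille.length : Int)) [])
          (PySem.Int.mod x (win : Int)) 0), List.nil_append]
      rw [PySem.List.pyGetD_eq_getElem grille [] hm0 (by exact_mod_cast hmlt)]
      rw [PySem.List.pyGetD_eq_getElem _ [] hm0 (by simpa using hmlt), List.getElem_map]
      set i : Nat := (PySem.Int.mod y (grille.length : Int)).toNat with hidef
      set row : List Int := grille[i] with hrowdef
      have hrowlen : min w_out ((win : Nat) : Int) ≤ (row.length : Int) := by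
        apply hrows
        have hlen2 : i < (grille.take h_out.toNat).length := by
          rw [List.length_take]; omega
        have h3 : (grille.take h_out.toNat)[i] = row := List.getElem_take (h := hlen2)
        exact h3 ▸ List.getElem_mem hlen2
      -- pass to the Nat statement
      set W : Nat := w_out.toNat with hWdef
      have hwcast : w_out = (W : Int) := by omega
      have hlenN : min W win ≤ row.length := by
        rw [hwcast, (Nat.cast_min W win : ((min W win : Nat) : Int) = min (W : Int) (win : Int)).symm] at hrowlen
        exact_mod_cast hrowlen
      have hreps : (PySem.Int.floordiv ((W : Nat) : Int) ((win : Nat) : Int) + 1).toNat = W / win + 1 := by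
        rw [PySem.Int.floordiv_natCast]
        generalize (W / win : Nat) = q
        omega
      rw [hwcast, PySem.List.pyRange_zero_natCast, List.map_map,
        PySem.List.slice_to _ (by positivity), PySem.List.slice_to _ (by exact_mod_cast hwin0.le),
        hreps]
      simp only [Int.toNat_natCast]
      rw [← pv_row_eq row W win hwin0 hlenN]
      apply List.map_congr_left
      intro x _
      simp only [Function.comp_apply]
      rw [PySem.Int.mod_natCast, PySem.List.pyGetD_natCast]
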